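-- pv_equiv track=rewrite | github.com/Perpetua-Kabute/advent-of-code-2024 | day_4_ceres_search/ceres_search_right.py | search_horizontal_forward
-- ===== SOURCE A (Python) =====
-- def search_horizontal_forward(input_matrix):
--     number_of_words = 0
--     for j in range(len(input_matrix)):
--         for i in range(len(input_matrix[j]) - 3):
--             row = input_matrix[j]
--             if row[i] == "X" and row[i+1] == "M" and row[i+2] == "A" and row [i+3] == "S":
--                 number_of_words += 1
--     return number_of_words
-- ===== SOURCE B (Python) =====
-- def search_horizontal_forward(input_matrix):
--     pattern = ["X", "M", "A", "S"]
--     total = 0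
--     for row in input_matrix:
--         state = 0
--         for cell in row:
--             if cell == pattern[state]:
--                 state += 1
--                 if state == 4:
--                     total += 1
--                     state = 0
--             else:
--                 state = 1 if cell == "X" else 0
--     return total
-- ===== Notes on version B (the rewrite author's own statement) =====
-- stated objective: alternative
-- what changed: Replaces A's per-position sliding window (four indexed comparisons at every start index) by a single-pass KMP-style automaton that keeps a match-progress state per row and does one comparison per cell; correct because the letters of XMAS are pairwise distinct, so all failure links are 0 or 1 and occurrences cannot overlap.
import Mathlib
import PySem

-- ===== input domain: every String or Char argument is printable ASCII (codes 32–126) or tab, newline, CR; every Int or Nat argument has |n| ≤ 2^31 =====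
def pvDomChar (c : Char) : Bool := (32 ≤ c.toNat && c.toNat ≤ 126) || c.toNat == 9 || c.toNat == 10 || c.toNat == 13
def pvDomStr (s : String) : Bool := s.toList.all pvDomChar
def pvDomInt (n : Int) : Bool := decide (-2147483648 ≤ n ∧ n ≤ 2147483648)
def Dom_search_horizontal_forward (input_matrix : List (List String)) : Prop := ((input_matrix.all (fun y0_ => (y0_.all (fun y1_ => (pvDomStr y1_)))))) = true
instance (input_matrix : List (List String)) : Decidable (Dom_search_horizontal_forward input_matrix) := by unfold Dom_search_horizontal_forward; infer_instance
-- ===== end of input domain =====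

-- B replaces A's per-position sliding window by a single-pass KMP-style automaton
-- (one match-progress state per row, one comparison per cell); same asymptotic cost.

-- ===== PORT A =====
-- literal transliteration: for j in range(len(m)): for i in range(len(m[j])-3): …
def search_horizontal_forward (input_matrix : List (List String)) : Int :=
  (PySem.List.pyRange 0 (input_matrix.length : Int) 1).foldl (fun number_of_words j =>
    (PySem.List.pyRange 0 (((PySem.List.pyGetD input_matrix j []).length : Int) - 3) 1).foldl
      (fun number_of_words i =>
        let row := PySem.List.pyGetD input_matrix j []
        if PySem.List.pyGetD row i "" = "X" ∧ PySem.List.pyGetD row (i+1) "" = "M" ∧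
           PySem.List.pyGetD row (i+2) "" = "A" ∧ PySem.List.pyGetD row (i+3) "" = "S"
        then number_of_words + 1 else number_of_words)
      number_of_words)
    0

-- ===== PORT B =====
-- pattern = ["X", "M", "A", "S"]
def pvPat : List String := ["X", "M", "A", "S"]

-- the automaton body of Source B: state carries (state, total), one comparison per cell
def search_horizontal_forward_alt (input_matrix : List (List String)) : Int :=
  input_matrix.foldl (fun total row =>
    (row.foldl (fun (p : Int × Int) cell =>
      if cell = PySem.List.pyGetD pvPat p.1 "" then
        let state := p.1 + 1
        if state = 4 then (0, p.2 + 1) else (state, p.2)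
      else ((if cell = "X" then 1 else 0), p.2))
      (0, total)).2) 0

-- ===== PRECONDITION & SPEC =====
def Spec_search_horizontal_forward (input_matrix : List (List String)) (out : Int) : Prop := out = search_horizontal_forward_alt input_matrix
instance (input_matrix : List (List String)) (out : Int) : Decidable (Spec_search_horizontal_forward input_matrix out) := by unfold Spec_search_horizontal_forward; infer_instance

-- ===== CLAIM (what is proved, stated in full; the proofs are below) =====
def Claim_equal_search_horizontal_forward : Prop := ∀ (input_matrix : List (List String)), Dom_search_horizontal_forward input_matrix → Spec_search_horizontal_forward input_matrix (search_horizontal_forward input_matrix)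

-- ===== LEMMAS AND PROOFS =====

-- reference structural count of "XMAS" windows in one row
def pvRowRec : List String → Int
  | a :: b :: c :: d :: t =>
      (if a = "X" ∧ b = "M" ∧ c = "A" ∧ d = "S" then 1 else 0) + pvRowRec (b :: c :: d :: t)
  | _ => 0
termination_by l => l.length

lemma pvGetD_cast_add (row : List String) (k : Nat) (c : Nat) :
    PySem.List.pyGetD row ((k : Int) + (c : Nat)) "" = row.getD (k + c) "" := by
  rw [show ((k : Int) + (c : Nat)) = (((k + c : Nat) : Nat) : Int) by push_cast; ring,
    PySem.List.pyGetD_natCast]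

-- helpers about pvRowRec
lemma pvRowRec_cons_ne (c : String) (t : List String) (h : c ≠ "X") :
    pvRowRec (c :: t) = pvRowRec t := by
  rcases t with _ | ⟨b, _ | ⟨d, _ | ⟨e, t'⟩⟩⟩
  · simp [pvRowRec.eq_def]
  · simp [pvRowRec.eq_def]
  · simp [pvRowRec.eq_def]
  · rw [pvRowRec.eq_def]
    simp [h]

lemma pvRowRec_cons_X (t : List String) :
    pvRowRec ("X" :: t) = (if ["M", "A", "S"] <+: t then 1 else 0) + pvRowRec t := by
  rcases t with _ | ⟨b, _ | ⟨d, _ | ⟨e, t'⟩⟩⟩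
  · simp [pvRowRec.eq_def]
  · simp [pvRowRec.eq_def, List.cons_prefix_cons]
  · simp [pvRowRec.eq_def, List.cons_prefix_cons]
  · have hiff : (["M", "A", "S"] <+: (b :: d :: e :: t')) ↔
        ("X" = "X" ∧ b = "M" ∧ d = "A" ∧ e = "S") := by
      constructor
      · rintro h
        rw [List.cons_prefix_cons, List.cons_prefix_cons, List.cons_prefix_cons] at h
        exact ⟨rfl, h.1.symm, h.2.1.symm, h.2.2.1.symm⟩
      · rintro ⟨-, h1, h2, h3⟩
        subst h1; subst h2; subst h3
        simp [List.cons_prefix_cons]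
    rw [pvRowRec.eq_def]
    simp only [hiff]

-- the pending virtual-prefix match contributed by automaton state s
def pvInd (s : Int) (row : List String) : Int :=
  if s ≠ 0 ∧ (pvPat.drop s.toNat) <+: row then 1 else 0

lemma pvInd0 (t : List String) : pvInd 0 t = 0 := by simp [pvInd]
lemma pvInd1 (t : List String) : pvInd 1 t = if ["M", "A", "S"] <+: t then 1 else 0 := by
  simp [pvInd, pvPat, show ((1 : Int)).toNat = 1 from rfl]
lemma pvInd2 (t : List String) : pvInd 2 t = if ["A", "S"] <+: t then 1 else 0 := by
  simp [pvInd, pvPat, show ((2 : Int)).toNat = 2 from rfl]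
lemma pvInd3 (t : List String) : pvInd 3 t = if ["S"] <+: t then 1 else 0 := by
  simp [pvInd, pvPat, show ((3 : Int)).toNat = 3 from rfl]

lemma pvPatGet0 : PySem.List.pyGetD pvPat 0 "" = "X" := by decide
lemma pvPatGet1 : PySem.List.pyGetD pvPat 1 "" = "M" := by decide
lemma pvPatGet2 : PySem.List.pyGetD pvPat 2 "" = "A" := by decide
lemma pvPatGet3 : PySem.List.pyGetD pvPat 3 "" = "S" := by decide

-- B's automaton run from state s counts the pending match plus all window matches
lemma dfa_eq (row : List String) :
    ∀ (s tot : Int), (s = 0 ∨ s = 1 ∨ s = 2 ∨ s = 3) →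
    (row.foldl (fun (p : Int × Int) cell =>
      if cell = PySem.List.pyGetD pvPat p.1 "" then
        let state := p.1 + 1
        if state = 4 then (0, p.2 + 1) else (state, p.2)
      else ((if cell = "X" then 1 else 0), p.2))
      (s, tot)).2 = tot + pvInd s row + pvRowRec row := by
  induction row with
  | nil =>
    intro s tot hs
    rcases hs with h | h | h | h <;> subst h <;>
      simp [pvInd0, pvInd1, pvInd2, pvInd3, pvRowRec]
  | cons cell t ih =>
    intro s tot hs
    rw [List.foldl_cons]
    rcases hs with h | h | h | h <;> subst h
    -- state 0: expecting "X"
    · simp only [pvPatGet0]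
      by_cases hx : cell = "X"
      · subst hx
        rw [if_pos rfl]
        norm_num
        rw [ih 1 tot (by tauto), pvRowRec_cons_X, pvInd1, pvInd0]
        try ring
      · rw [if_neg hx, if_neg hx, ih 0 tot (by tauto), pvRowRec_cons_ne cell t hx,
          pvInd0, pvInd0]
    -- state 1: expecting "M"
    · simp only [pvPatGet1]
      by_cases hm : cell = "M"
      · subst hm
        rw [if_pos rfl]
        norm_num
        rw [ih 2 tot (by tauto), pvRowRec_cons_ne "M" t (by decide), pvInd2, pvInd1]
        simp only [List.cons_prefix_cons, true_and]
        try ring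
      · rw [if_neg hm]
        by_cases hx : cell = "X"
        · subst hx
          rw [if_pos rfl, ih 1 tot (by tauto), pvRowRec_cons_X, pvInd1, pvInd1]
          simp [List.cons_prefix_cons]
          try ring
        · rw [if_neg hx, ih 0 tot (by tauto), pvRowRec_cons_ne cell t hx, pvInd0, pvInd1]
          simp [List.cons_prefix_cons, Ne.symm hm]
    -- state 2: expecting "A"
    · simp only [pvPatGet2]
      by_cases ha : cell = "A"
      · subst ha
        rw [if_pos rfl]
        norm_num
        rw [ih 3 tot (by tauto), pvRowRec_cons_ne "A" t (by decide), pvInd3, pvInd2]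
        simp only [List.cons_prefix_cons, true_and]
        try ring
      · rw [if_neg ha]
        by_cases hx : cell = "X"
        · subst hx
          rw [if_pos rfl, ih 1 tot (by tauto), pvRowRec_cons_X, pvInd1, pvInd2]
          simp [List.cons_prefix_cons]
          try ring
        · rw [if_neg hx, ih 0 tot (by tauto), pvRowRec_cons_ne cell t hx, pvInd0, pvInd2]
          simp [List.cons_prefix_cons, Ne.symm ha]
    -- state 3: expecting "S"
    · simp only [pvPatGet3]
      by_cases hS : cell = "S"
      · subst hS
        rw [if_pos rfl]
        norm_num
        rw [ih 0 (tot + 1) (by tauto), pvRowRec_cons_ne "S" t (by decide), pvInd0, pvInd3]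
        simp [List.cons_prefix_cons]
        try ring
      · rw [if_neg hS]
        by_cases hx : cell = "X"
        · subst hx
          rw [if_pos rfl, ih 1 tot (by tauto), pvRowRec_cons_X, pvInd1, pvInd3]
          simp [List.cons_prefix_cons]
          try ring
          try ring
        · rw [if_neg hx, ih 0 tot (by tauto), pvRowRec_cons_ne cell t hx, pvInd0, pvInd3]
          simp [List.cons_prefix_cons, Ne.symm hS]

-- A's inner range fold equals the structural count
lemma rangefold_eq (row : List String) (acc : Int) :
    (PySem.List.pyRange 0 ((row.length : Int) - 3) 1).foldl
      (fun n i =>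
        if PySem.List.pyGetD row i "" = "X" ∧ PySem.List.pyGetD row (i+1) "" = "M" ∧
           PySem.List.pyGetD row (i+2) "" = "A" ∧ PySem.List.pyGetD row (i+3) "" = "S"
        then n + 1 else n) acc
    = acc + pvRowRec row := by
  rw [PySem.List.pyRange_one, List.foldl_map]
  have hto : (((row.length : Int) - 3) - 0).toNat = row.length - 3 := by omega
  rw [hto]
  have hbody : ∀ (n : Int) (k : Nat),
      (fun (n : Int) (i : Int) =>
        if PySem.List.pyGetD row i "" = "X" ∧ PySem.List.pyGetD row (i+1) "" = "M" ∧
           PySem.List.pyGetD row (i+2) "" = "A" ∧ PySem.List.pyGetD row (i+3) "" = "S"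
        then n + 1 else n) n ((0 : Int) + (k : Nat))
      = (if row.getD k "" = "X" ∧ row.getD (k+1) "" = "M" ∧
           row.getD (k+2) "" = "A" ∧ row.getD (k+3) "" = "S" then n + 1 else n) := by
    intro n k
    simp only [zero_add]
    rw [show ((k : Int) + 1) = ((k : Int) + (1 : Nat)) by norm_num,
        show ((k : Int) + 2) = ((k : Int) + (2 : Nat)) by norm_num,
        show ((k : Int) + 3) = ((k : Int) + (3 : Nat)) by norm_num,
        pvGetD_cast_add, pvGetD_cast_add, pvGetD_cast_add, PySem.List.pyGetD_natCast]
  simp only [hbody]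
  clear hbody hto
  induction row using pvRowRec.induct generalizing acc with
  | case1 a b c d t ih =>
    have hlen : (a :: b :: c :: d :: t).length - 3 = t.length + 1 := by
      simp [List.length]
    rw [hlen, List.range_succ_eq_map, List.foldl_cons, List.foldl_map]
    have hlen2 : (b :: c :: d :: t).length - 3 = t.length := by simp [List.length]
    rw [hlen2] at ih
    have hshift : ∀ (n : Int) (k : Nat),
        (if (a :: b :: c :: d :: t).getD (k+1) "" = "X" ∧
            (a :: b :: c :: d :: t).getD (k+1+1) "" = "M" ∧
            (a :: b :: c :: d :: t).getD (k+1+2) "" = "A" ∧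
            (a :: b :: c :: d :: t).getD (k+1+3) "" = "S" then n + 1 else n)
        = (if (b :: c :: d :: t).getD k "" = "X" ∧ (b :: c :: d :: t).getD (k+1) "" = "M" ∧
             (b :: c :: d :: t).getD (k+2) "" = "A" ∧ (b :: c :: d :: t).getD (k+3) "" = "S"
           then n + 1 else n) := by
      intro n k
      have c1 : (a :: b :: c :: d :: t).getD (k+1) "" = (b :: c :: d :: t).getD k "" :=
        List.getD_cons_succ
      have c2 : (a :: b :: c :: d :: t).getD (k+1+1) "" = (b :: c :: d :: t).getD (k+1) "" :=
        List.getD_cons_succ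
      have c3 : (a :: b :: c :: d :: t).getD (k+1+2) "" = (b :: c :: d :: t).getD (k+2) "" := by
        rw [show (k+1+2 : Nat) = (k+2)+1 from rfl]; exact List.getD_cons_succ
      have c4 : (a :: b :: c :: d :: t).getD (k+1+3) "" = (b :: c :: d :: t).getD (k+3) "" := by
        rw [show (k+1+3 : Nat) = (k+3)+1 from rfl]; exact List.getD_cons_succ
      rw [c1, c2, c3, c4]
    simp only [hshift]
    rw [ih, pvRowRec]
    norm_num [List.getD]
    split_ifs with h
    · ring
    · ring
  | case2 row h =>
    rw [pvRowRec.eq_def]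
    rcases row with _ | ⟨a, _ | ⟨b, _ | ⟨c, _ | ⟨d, t⟩⟩⟩⟩
    · simp
    · simp
    · simp
    · simp
    · exact (h a b c d t rfl).elim

-- A's outer index loop over the matrix equals a direct fold over the rows
lemma outer_eq (g : Int → List String → Int) :
    ∀ (m : List (List String)) (acc : Int),
      (List.range m.length).foldl (fun n k => g n (m.getD k [])) acc = m.foldl g acc := by
  intro m
  induction m with
  | nil => intro acc; rfl
  | cons r t ih =>
    intro acc
    rw [List.length_cons, List.range_succ_eq_map, List.foldl_cons, List.foldl_map]
    simp only [List.getD_cons_succ, List.getD_cons_zero]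
    exact ih _

-- lift both per-row results and combine
lemma both_eq (m : List (List String)) :
    search_horizontal_forward m = search_horizontal_forward_alt m := by
  unfold search_horizontal_forward search_horizontal_forward_alt
  rw [PySem.List.pyRange_one, List.foldl_map]
  have hto : (((m.length : Int)) - 0).toNat = m.length := by omega
  rw [hto]
  have hbody : ∀ (n : Int) (k : Nat),
      (PySem.List.pyRange 0 (((PySem.List.pyGetD m ((0:Int) + (k:Nat)) []).length : Int) - 3) 1).foldl
        (fun number_of_words i =>
          let row := PySem.List.pyGetD m ((0:Int) + (k:Nat)) []
          if PySem.List.pyGetD row i "" = "X" ∧ PySem.List.pyGetD row (i+1) "" = "M" ∧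
             PySem.List.pyGetD row (i+2) "" = "A" ∧ PySem.List.pyGetD row (i+3) "" = "S"
          then number_of_words + 1 else number_of_words) n
      = n + pvRowRec (m.getD k []) := by
    intro n k
    simp only [zero_add, PySem.List.pyGetD_natCast]
    exact rangefold_eq (m.getD k []) n
  simp only [hbody]
  rw [outer_eq (fun n row => n + pvRowRec row)]
  have hrows : ∀ (l : List (List String)) (n : Int),
      l.foldl (fun n row => n + pvRowRec row) n
      = l.foldl (fun total row =>
          (row.foldl (fun (p : Int × Int) cell =>
            if cell = PySem.List.pyGetD pvPat p.1 "" then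
              let state := p.1 + 1
              if state = 4 then (0, p.2 + 1) else (state, p.2)
            else ((if cell = "X" then 1 else 0), p.2))
            (0, total)).2) n := by
    intro l
    induction l with
    | nil => intro n; rfl
    | cons r t ihl =>
      intro n
      simp only [List.foldl_cons]
      rw [dfa_eq r 0 n (Or.inl rfl)]
      simp only [pvInd, ne_eq, not_true_eq_false, false_and, if_false, add_zero]
      exact ihl _
  exact hrows m 0

-- ===== VERDICT (by name: the statement is the Claim_ definition above) =====
theorem search_horizontal_forward_spec : Claim_equal_search_horizontal_forward := by
  intro m _
  unfold Spec_search_horizontal_forward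
  exact both_eq m
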